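-- pv_equiv track=rewrite | github.com/AndreIglesias/Python | permuCombina.py | combs2
-- ===== SOURCE A (Python) =====
-- def combs2(n, available, used):
--     if len(used) == n:
--         yield tuple(used)
--     elif len(available) <= 0:
--         pass
--     else:
--         for c in combs2(n, available[1:], used[:]+[available[0]]):
--             yield c
--         for c in combs2(n, available[1:], used[:]):
--             yield c
-- ===== SOURCE B (Python) =====
-- def combs2(n, available, used):
--     need = n - len(used)
--     if need < 0:
--         return
--     base = tuple(used)
--     for c in _klists(available, need):
--         yield base + c
--
-- def _klists(avail, k):
--     # all size-k combinations of avail, in lexicographic index order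
--     if k == 0:
--         return [()]
--     out = []
--     for i, x in enumerate(avail):
--         for t in _klists(avail[i + 1:], k - 1):
--             out.append((x,) + t)
--     return out
-- ===== Notes on version B (the rewrite author's own statement) =====
-- stated objective: faster
-- what changed: A's include/exclude binary recursion threads `used` through a 2^len(available) call tree even when most branches yield nothing; B builds the size-(n-len(used)) combinations of `available` directly (recursion on k with one flat loop over positions), prefixing tuple(used) once, so work is proportional to the output and need<0 short-circuits.
import Mathlib
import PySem

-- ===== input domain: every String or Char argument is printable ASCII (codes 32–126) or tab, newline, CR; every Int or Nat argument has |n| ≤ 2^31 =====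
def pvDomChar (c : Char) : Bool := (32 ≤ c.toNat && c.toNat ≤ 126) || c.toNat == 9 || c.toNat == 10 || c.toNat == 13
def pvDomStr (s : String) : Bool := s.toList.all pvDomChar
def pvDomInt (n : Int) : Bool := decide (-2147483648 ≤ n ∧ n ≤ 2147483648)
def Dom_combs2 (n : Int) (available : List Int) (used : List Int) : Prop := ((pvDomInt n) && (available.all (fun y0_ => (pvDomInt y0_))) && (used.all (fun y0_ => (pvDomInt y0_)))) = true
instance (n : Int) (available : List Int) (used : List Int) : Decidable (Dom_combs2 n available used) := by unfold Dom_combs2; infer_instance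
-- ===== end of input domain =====

-- B replaces A's include/exclude recursion that threads `used` down the tree by a
-- helper that enumerates the size-k combinations of `available` directly
-- (recursion on k, one flat loop over positions) and prefixes `used` once, avoiding the exponential call tree; objective: faster (measured).

-- ===== PORT A =====
-- A is a generator; its port returns the list of yielded values, in yield order.
def combs2 (n : Int) (available : List Int) (used : List Int) : List (List Int) :=
  if (used.length : Int) = n then [used]          -- yield tuple(used)
  else
    match available with
    | [] => []                                    -- len(available) <= 0: pass
    | a :: rest =>                                -- a = available[0], rest = available[1:]
      combs2 n rest (used ++ [a]) ++ combs2 n rest used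
termination_by available.length

-- ===== PORT B =====
-- Source B's _klists: all size-k combinations of avail, lexicographic index order.
def klists (avail : List Int) (k : Nat) : List (List Int) :=
  match k with
  | 0 => [[]]
  | Nat.succ k' =>
    (PySem.List.enumerate avail 0).foldl
      (fun out p =>
        out ++ (klists (PySem.List.slice avail (some (p.1 + 1)) none) k').map (fun t => p.2 :: t))
      []
termination_by k

def combs2_alt (n : Int) (available : List Int) (used : List Int) : List (List Int) :=
  let need := n - (used.length : Int)
  if need < 0 then []
  else (klists available need.toNat).map (fun c => used ++ c)

-- ===== PRECONDITION & SPEC =====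
def Spec_combs2 (n : Int) (available : List Int) (used : List Int) (out : List (List Int)) : Prop := out = combs2_alt n available used
instance (n : Int) (available : List Int) (used : List Int) (out : List (List Int)) : Decidable (Spec_combs2 n available used out) := by unfold Spec_combs2; infer_instance

-- ===== CLAIM (what is proved, stated in full; the proofs are below) =====
def Claim_equal_combs2 : Prop := ∀ (n : Int) (available : List Int) (used : List Int), Dom_combs2 n available used → Spec_combs2 n available used (combs2 n available used)

-- ===== LEMMAS AND PROOFS =====

-- Proof-side middle form: the plain structural recursion for size-k combinations.
def combRec : Nat → List Int → List (List Int)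
  | 0, _ => [[]]
  | _+1, [] => []
  | k+1, x :: r => (combRec k r).map (x :: ·) ++ combRec (k+1) r

-- A equals: prefix `used` onto every size-(n - |used|) combination (nothing if |used| > n).
theorem combs2_char (n : Int) (avail used : List Int) :
    combs2 n avail used =
      if (used.length : Int) ≤ n then (combRec (n - used.length).toNat avail).map (used ++ ·) else [] := by
  induction avail generalizing used with
  | nil =>
    unfold combs2
    rcases lt_trichotomy (used.length : Int) n with h | h | h
    · have h0 : (n - (used.length : Int)).toNat ≠ 0 := by omega
      rw [if_neg (by omega), if_pos (by omega)]
      rcases Nat.exists_eq_succ_of_ne_zero h0 with ⟨k, hk⟩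
      simp [hk, combRec]
    · simp [h, combRec]
    · rw [if_neg (by omega), if_neg (by omega)]
  | cons x r ih =>
    unfold combs2
    rcases lt_trichotomy (used.length : Int) n with h | h | h
    · have h0 : (n - (used.length : Int)).toNat ≠ 0 := by omega
      rw [if_neg (by omega), if_pos (by omega)]
      rcases Nat.exists_eq_succ_of_ne_zero h0 with ⟨k, hk⟩
      dsimp only
      rw [ih (used ++ [x]), ih used]
      rw [if_pos (by simp; omega), if_pos (by omega)]
      have hk1 : (n - ((used ++ [x]).length : Int)).toNat = k := by simp; omega
      rw [hk1, hk, combRec]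
      simp [List.map_map, Function.comp_def]
    · simp [h, combRec]
    · rw [if_neg (by omega), if_neg (by omega)]
      dsimp only
      rw [ih (used ++ [x]), ih used]
      rw [if_neg (by simp; omega), if_neg (by omega)]
      simp
-- the enumerate-driven loop of klists, started after a prefix `pre`, enumerates combRec.
theorem klists_shift (k : Nat)
    (ihk : ∀ a : List Int, klists a k = combRec k a) :
    ∀ (avail pre : List Int),
      (PySem.List.enumerate avail (pre.length : Int)).flatMap
        (fun p => (klists (PySem.List.slice (pre ++ avail) (some (p.1 + 1)) none) k).map (fun t => p.2 :: t))
      = combRec (k+1) avail := by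
  intro avail
  induction avail with
  | nil => intro pre; simp [PySem.List.enumerate_nil, combRec]
  | cons x r ih =>
    intro pre
    rw [PySem.List.enumerate_cons]
    rw [List.flatMap_cons]
    have hslice : PySem.List.slice (pre ++ x :: r) (some ((pre.length : Int) + 1)) none = r := by
      have : ((pre.length : Int) + 1) = ((pre.length + 1 : Nat) : Int) := by push_cast; ring
      rw [this, PySem.List.slice_from_natCast]
      rw [show pre ++ x :: r = (pre ++ [x]) ++ r by simp]
      rw [List.drop_append_of_le_length (by simp)]
      simp
    have hrest := ih (pre ++ [x])
    have hlen : ((pre ++ [x]).length : Int) = (pre.length : Int) + 1 := by simp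
    rw [hlen] at hrest
    simp only [show (pre ++ [x]) ++ r = pre ++ x :: r by simp] at hrest
    rw [hslice, hrest, ihk r, combRec]

theorem klists_eq_combRec (k : Nat) (avail : List Int) : klists avail k = combRec k avail := by
  induction k generalizing avail with
  | zero => simp [klists, combRec]
  | succ k ih =>
    rw [klists]
    rw [show (0 : Int) = (([] : List Int).length : Int) by simp]
    have hfold := PySem.List.foldl_append_eq_flatMap
      (l := PySem.List.enumerate avail (([] : List Int).length : Int))
      (g := fun p => (klists (PySem.List.slice avail (some (p.1 + 1)) none) k).map (fun t => p.2 :: t))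
      (acc := [])
    rw [hfold, List.nil_append]
    have := klists_shift k ih avail []
    simpa using this

-- ===== VERDICT (by name: the statement is the Claim_ definition above) =====
theorem combs2_spec : Claim_equal_combs2 := by
  intro n avail used _
  unfold Spec_combs2 combs2_alt
  rw [combs2_char]
  simp only []
  by_cases h : n - (used.length : Int) < 0
  · rw [if_neg (by omega), if_pos h]
  · rw [if_pos (by omega), if_neg h, klists_eq_combRec]
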